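-- pv_equiv track=rewrite | github.com/JadSbai/Indoor-Location-Sensing | models/helpers.py | hot_encode
-- ===== SOURCE A (Python) =====
-- from typing import List, Tuple, Dict
--
-- def hot_encode(features: List[List[Tuple[Tuple[int, int], int]]]):
--     encoded_features = []
--     for measurements in features:
--         feature = [-100, 0, -100, 0]
--         for measurement in measurements:
--             rss, snr = measurement[0]
--             anchor_id = measurement[1]
--             if anchor_id == 1:
--                 feature[0] = rss
--                 feature[1] = snr
--             if anchor_id == 2:
--                 feature[2] = rss
--                 feature[3] = snr
--         encoded_features.append(feature)
--     return encoded_features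
-- ===== SOURCE B (Python) =====
-- def hot_encode(features):
--     def last_pair(measurements, anchor):
--         # last-wins forward == first match scanning backwards; stop early
--         for pair, aid in reversed(measurements):
--             if aid == anchor:
--                 return pair
--         return (-100, 0)
--     out = []
--     for ms in features:
--         (r1, s1), (r2, s2) = last_pair(ms, 1), last_pair(ms, 2)
--         out.append([r1, s1, r2, s2])
--     return out
-- ===== Notes on version B (the rewrite author's own statement) =====
-- stated objective: simpler
-- what changed: Instead of one forward pass mutating a 4-slot list with per-anchor conditional writes, B performs two independent early-exit searches over the reversed group (first match from the back = last-wins) and assembles the vector from the two found pairs.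
import Mathlib
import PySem

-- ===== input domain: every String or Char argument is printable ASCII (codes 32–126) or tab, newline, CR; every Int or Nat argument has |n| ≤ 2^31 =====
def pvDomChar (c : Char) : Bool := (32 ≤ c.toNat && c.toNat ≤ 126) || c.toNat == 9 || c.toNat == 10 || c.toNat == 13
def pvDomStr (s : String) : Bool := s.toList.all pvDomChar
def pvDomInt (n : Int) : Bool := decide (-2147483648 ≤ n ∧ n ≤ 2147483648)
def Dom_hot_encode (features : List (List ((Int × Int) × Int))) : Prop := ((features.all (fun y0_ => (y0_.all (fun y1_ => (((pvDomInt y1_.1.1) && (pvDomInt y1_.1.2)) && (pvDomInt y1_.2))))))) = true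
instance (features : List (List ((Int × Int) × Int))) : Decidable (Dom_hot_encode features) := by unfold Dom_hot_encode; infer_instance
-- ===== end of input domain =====

-- B replaces A's forward pass of conditional writes into a mutable 4-slot list by two
-- early-exit searches over the reversed group (first match from the back = last-wins);
-- same cost, simpler decomposition.

-- ===== PORT A =====
-- the inner-loop body: conditional assignments into the fixed slots of `feature`
def hotStepA (feature : List Int) (measurement : (Int × Int) × Int) : List Int :=
  let rss := measurement.1.1
  let snr := measurement.1.2
  let anchor_id := measurement.2
  let feature := if anchor_id == 1 then (feature.set 0 rss).set 1 snr else feature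
  if anchor_id == 2 then (feature.set 2 rss).set 3 snr else feature

def hot_encode (features : List (List ((Int × Int) × Int))) : List (List Int) :=
  features.foldl
    (fun encoded_features measurements =>
      encoded_features ++ [measurements.foldl hotStepA [-100, 0, -100, 0]])
    []

-- ===== PORT B =====
-- the early-exit for-loop of last_pair over the (already reversed) measurements
def hotFind (anchor : Int) : List ((Int × Int) × Int) → Int × Int
  | [] => (-100, 0)
  | m :: rest => if m.2 == anchor then m.1 else hotFind anchor rest

def lastPair (measurements : List ((Int × Int) × Int)) (anchor : Int) : Int × Int :=
  hotFind anchor measurements.reverse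

def hot_encode_alt (features : List (List ((Int × Int) × Int))) : List (List Int) :=
  features.foldl
    (fun out ms =>
      let p1 := lastPair ms 1
      let p2 := lastPair ms 2
      out ++ [[p1.1, p1.2, p2.1, p2.2]])
    []

-- ===== PRECONDITION & SPEC =====
def Spec_hot_encode (features : List (List ((Int × Int) × Int))) (out : List (List Int)) : Prop := out = hot_encode_alt features
instance (features : List (List ((Int × Int) × Int))) (out : List (List Int)) : Decidable (Spec_hot_encode features out) := by unfold Spec_hot_encode; infer_instance

-- ===== CLAIM =====
def Claim_equal_hot_encode : Prop := ∀ (features : List (List ((Int × Int) × Int))), Dom_hot_encode features → Spec_hot_encode features (hot_encode features)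

-- ===== LEMMAS AND PROOFS =====

lemma hot_group (ms : List ((Int × Int) × Int)) :
    ms.foldl hotStepA [-100, 0, -100, 0] =
      [(lastPair ms 1).1, (lastPair ms 1).2, (lastPair ms 2).1, (lastPair ms 2).2] := by
  induction ms using List.reverseRecOn with
  | nil => rfl
  | append_singleton ms m ih =>
    rw [List.foldl_append, List.foldl_cons, List.foldl_nil, ih]
    unfold lastPair
    rw [List.reverse_append]
    simp only [List.reverse_singleton, List.singleton_append, hotFind]
    unfold hotStepA
    rcases eq_or_ne m.2 1 with h1 | h1
    · simp [h1]
    · rcases eq_or_ne m.2 2 with h2 | h2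
      · simp [h2]
      · simp [h1, h2]

lemma hot_fold (fs : List (List ((Int × Int) × Int))) (acc : List (List Int)) :
    fs.foldl (fun e ms => e ++ [ms.foldl hotStepA [-100, 0, -100, 0]]) acc =
      fs.foldl (fun out ms =>
        let p1 := lastPair ms 1
        let p2 := lastPair ms 2
        out ++ [[p1.1, p1.2, p2.1, p2.2]]) acc := by
  simp only [hot_group]

-- ===== VERDICT =====
theorem hot_encode_spec : Claim_equal_hot_encode := by
  intro features _
  unfold Spec_hot_encode hot_encode hot_encode_alt
  exact hot_fold features []
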